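-- pv_equiv track=rewrite | github.com/ganeshpaih24/pythonAssignments | Assignment 1/solution_3.py | is_sator_square
-- ===== SOURCE A (Python) =====
-- def is_sator_square(tablet):
--     i = 0
--     j = 0
--     n = len(tablet)
--     m = n
--
--     if n % 2:
--         m2 = int(n // 2)
--     else:
--         m2 = int(n + 1 // 2)
--
--     while i <= m2:
--         while j < m:
--             if i == j:
--                 if tablet[i][j] == tablet[n - i - 1][n - j - 1]:
--                     j += 1
--                     continue
--                 else:
--                     return False
--
--             if tablet[i][j] == tablet[j][i] == tablet[n - i - 1][n - j - 1] == tablet[n - j - 1][n - i - 1]: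
--                 pass
--             else:
--                 return False
--             j += 1
--         j = i + 1
--         m -= 1
--         i += 1
--     return True
-- ===== SOURCE B (Python) =====
-- def is_sator_square(tablet):
--     n = len(tablet)
--     return all(tablet[i][j] == tablet[j][i] and tablet[i][j] == tablet[n - 1 - i][n - 1 - j]
--                for i in range(n) for j in range(n))
-- ===== Notes on version B (the rewrite author's own statement) =====
-- stated objective: simpler
-- what changed: Replaces the shrinking-triangle while-loop scan with its special diagonal branch by a single full-grid pass checking transpose symmetry and 180-degree-rotation symmetry at every cell.
-- outside the precondition, e.g. on is_sator_square([['a', 'a'], ['a', 'a', 'b'], ['a', 'a', 'a']]): A returns False, B raises IndexError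
import Mathlib
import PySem

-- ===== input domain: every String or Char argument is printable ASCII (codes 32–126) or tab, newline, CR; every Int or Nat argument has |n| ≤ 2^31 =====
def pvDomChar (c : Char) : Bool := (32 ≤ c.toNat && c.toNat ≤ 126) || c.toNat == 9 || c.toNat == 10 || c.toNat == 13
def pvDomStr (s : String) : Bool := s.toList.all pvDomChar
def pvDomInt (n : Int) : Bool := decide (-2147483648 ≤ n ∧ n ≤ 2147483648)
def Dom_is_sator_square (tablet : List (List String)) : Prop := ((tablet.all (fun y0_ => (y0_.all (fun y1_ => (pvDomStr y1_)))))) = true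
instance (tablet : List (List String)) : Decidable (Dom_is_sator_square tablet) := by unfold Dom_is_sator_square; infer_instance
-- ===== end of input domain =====

-- B replaces A's shrinking-triangle while-loop scan (with its special diagonal branch)
-- by a single full-grid pass checking transpose and 180°-rotation symmetry at every cell;
-- objective: simpler.

-- ===== PORT A =====
-- tablet[i][j] (IndexError = none); shared indexing helper for both ports
def pvGetCell (t : List (List String)) (i j : Int) : Option String :=
  (PySem.List.pyGet? t i).bind (fun row => PySem.List.pyGet? row j)

-- the body of A's inner loop at (i, j): the i == j branch, else the chained comparison
def satorCheck (t : List (List String)) (n i j : Int) : Bool :=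
  if i = j then
    pvGetCell t i j == pvGetCell t (n - i - 1) (n - j - 1)
  else
    pvGetCell t i j == pvGetCell t j i &&
      (pvGetCell t j i == pvGetCell t (n - i - 1) (n - j - 1) &&
        pvGetCell t (n - i - 1) (n - j - 1) == pvGetCell t (n - j - 1) (n - i - 1))

-- A's nested while loops as one recursion over the state (i, j, m)
def satorLoop (t : List (List String)) (n m2 i j m : Int) : Bool :=
  if hi : i ≤ m2 then
    if hj : j < m then
      satorCheck t n i j && satorLoop t n m2 i (j + 1) m
    else
      satorLoop t n m2 (i + 1) (i + 1) (m - 1)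
  else
    true
termination_by ((m2 + 1 - i).toNat, (m - j).toNat)
decreasing_by
  · apply Prod.Lex.right
    omega
  · apply Prod.Lex.left
    omega

def is_sator_square (tablet : List (List String)) : Bool :=
  let n : Int := (tablet.length : Int)
  let m2 : Int := if PySem.Int.mod n 2 ≠ 0 then PySem.Int.floordiv n 2
                  else n + PySem.Int.floordiv 1 2
  satorLoop tablet n m2 0 0 n

-- ===== PORT B =====
def is_sator_square_alt (tablet : List (List String)) : Bool :=
  let n : Int := (tablet.length : Int)
  (PySem.List.pyRange 0 n 1).all (fun i =>
    (PySem.List.pyRange 0 n 1).all (fun j =>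
      (pvGetCell tablet i j == pvGetCell tablet j i) &&
      (pvGetCell tablet i j == pvGetCell tablet (n - 1 - i) (n - 1 - j))))

-- ===== PRECONDITION & SPEC =====
-- Pre_ excludes tablets with a row shorter than len(tablet): there the programs read
-- out-of-range cells and, depending on the values, A and/or B raises IndexError
-- (A may also return False before reaching the short row while B raises).
def Pre_is_sator_square (tablet : List (List String)) : Prop :=
  ∀ row ∈ tablet, tablet.length ≤ row.length
instance (tablet : List (List String)) : Decidable (Pre_is_sator_square tablet) := by
  unfold Pre_is_sator_square; infer_instance

def pvWitness_is_sator_square : List (List String) :=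
  [["s", "a", "t"], ["a", "x", "a"], ["t", "a", "s"]]

def Spec_is_sator_square (tablet : List (List String)) (out : Bool) : Prop :=
  out = is_sator_square_alt tablet
instance (tablet : List (List String)) (out : Bool) : Decidable (Spec_is_sator_square tablet out) := by
  unfold Spec_is_sator_square; infer_instance

-- ===== CLAIM =====
def Claim_equal_is_sator_square : Prop :=
  ∀ (tablet : List (List String)), Dom_is_sator_square tablet →
    Pre_is_sator_square tablet → Spec_is_sator_square tablet (is_sator_square tablet)

-- ===== LEMMAS AND PROOFS =====

-- cell value at Nat indices (total helper, used only in proofs)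
def gN (t : List (List String)) (i j : Nat) : String := (t.getD i []).getD j ""

-- the common specification both ports are proved equivalent to
def QQ (t : List (List String)) : Prop :=
  ∀ i j : Nat, i < t.length → j < t.length →
    gN t i j = gN t j i ∧ gN t i j = gN t (t.length - 1 - i) (t.length - 1 - j)

theorem cell_eq (t : List (List String)) (hpre : Pre_is_sator_square t)
    (i j : Nat) (hi : i < t.length) (hj : j < t.length) :
    pvGetCell t (i : Int) (j : Int) = some (gN t i j) := by
  have hmem : t[i] ∈ t := List.getElem_mem hi
  have hjr : j < t[i].length := lt_of_lt_of_le hj (hpre _ hmem)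
  unfold pvGetCell gN
  rw [PySem.List.pyGet?_natCast, List.getElem?_eq_getElem hi]
  show (PySem.List.pyGet? t[i] (j:Int)) = _
  rw [PySem.List.pyGet?_natCast, List.getElem?_eq_getElem hjr]
  simp [List.getD_eq_getElem?_getD, hi, hjr]

theorem m2_facts (t : List (List String)) :
    (∀ x : Nat, 2 * x + 1 ≤ t.length →
      (x : Int) ≤ (if PySem.Int.mod (t.length : Int) 2 ≠ 0
                   then PySem.Int.floordiv (t.length : Int) 2
                   else (t.length : Int) + PySem.Int.floordiv 1 2)) := by
  intro x hx
  split_ifs with h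
  · rw [PySem.Int.mod_eq_emod_of_pos (by norm_num)] at h
    rw [PySem.Int.floordiv_eq_ediv_of_pos (by norm_num)]
    omega
  · rw [PySem.Int.floordiv_eq_ediv_of_pos (by norm_num)]
    omega

theorem alt_iff_QQ (t : List (List String)) (hpre : Pre_is_sator_square t) :
    is_sator_square_alt t = true ↔ QQ t := by
  unfold is_sator_square_alt QQ
  simp only []
  rw [PySem.List.pyRange_zero_natCast]
  simp only [List.all_map, List.all_eq_true, List.mem_range, Function.comp]
  constructor
  · intro h i j hi hj
    have h2 := h i hi j hj
    have e1 : (t.length : Int) - 1 - (i : Int) = ((t.length - 1 - i : Nat) : Int) := by omega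
    have e2 : (t.length : Int) - 1 - (j : Int) = ((t.length - 1 - j : Nat) : Int) := by omega
    rw [e1, e2, cell_eq t hpre i j hi hj, cell_eq t hpre j i hj hi,
        cell_eq t hpre _ _ (by omega) (by omega)] at h2
    simpa using h2
  · intro h i hi j hj
    have e1 : (t.length : Int) - 1 - (i : Int) = ((t.length - 1 - i : Nat) : Int) := by omega
    have e2 : (t.length : Int) - 1 - (j : Int) = ((t.length - 1 - j : Nat) : Int) := by omega
    rw [e1, e2, cell_eq t hpre i j hi hj, cell_eq t hpre j i hj hi,
        cell_eq t hpre _ _ (by omega) (by omega)]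
    simpa using h i j hi hj

theorem loopA_of_QQ (t : List (List String)) (m2 : Int)
    (hpre : Pre_is_sator_square t) (hq : QQ t) :
    ∀ i j m : Int, 0 ≤ i → 0 ≤ j → m ≤ (t.length : Int) - i →
      satorLoop t (t.length : Int) m2 i j m = true := by
  intro i j m
  fun_induction satorLoop t ((t.length : Int)) m2 i j m with
  | case1 i j m hi hj IH =>
    intro h1 h2 h3
    rw [Bool.and_eq_true]
    refine ⟨?_, IH h1 (by omega) h3⟩
    obtain ⟨a, rfl⟩ : ∃ a : Nat, ((a : Nat) : Int) = i := ⟨i.toNat, by omega⟩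
    obtain ⟨b, rfl⟩ : ∃ b : Nat, ((b : Nat) : Int) = j := ⟨j.toNat, by omega⟩
    have ha : a < t.length := by omega
    have hb : b < t.length := by omega
    have e1 : (t.length : Int) - (a : Int) - 1 = ((t.length - 1 - a : Nat) : Int) := by omega
    have e2 : (t.length : Int) - (b : Int) - 1 = ((t.length - 1 - b : Nat) : Int) := by omega
    unfold satorCheck
    split_ifs with hij
    · have hab : a = b := by exact_mod_cast hij
      subst hab
      rw [e1, cell_eq t hpre a a ha ha, cell_eq t hpre _ _ (by omega) (by omega)]
      simpa using (hq a a ha ha).2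
    · rw [e1, e2, cell_eq t hpre a b ha hb, cell_eq t hpre b a hb ha,
          cell_eq t hpre _ _ (by omega) (by omega), cell_eq t hpre _ _ (by omega) (by omega)]
      simp only [Bool.and_eq_true, beq_iff_eq, Option.some.injEq]
      have q1 := hq a b ha hb
      have q3 := (hq (t.length - 1 - a) (t.length - 1 - b) (by omega) (by omega)).1
      exact ⟨q1.1, by rw [← q1.1]; exact q1.2, q3⟩
  | case2 i j m hi hj IH =>
    intro h1 h2 h3
    exact IH (by omega) (by omega) (by omega)
  | case3 i j m hi =>
    intro _ _ _
    rfl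

theorem loopA_checks (t : List (List String)) (m2 : Int) :
    ∀ i j m : Int, m = (t.length : Int) - i →
      satorLoop t (t.length : Int) m2 i j m = true →
      ∀ a b : Int,
        ((a = i ∧ a ≤ m2 ∧ j ≤ b ∧ b < m) ∨
         (i < a ∧ a ≤ m2 ∧ a ≤ b ∧ b < (t.length : Int) - a)) →
        satorCheck t (t.length : Int) a b = true := by
  intro i j m
  fun_induction satorLoop t ((t.length : Int)) m2 i j m with
  | case1 i j m hi hj IH =>
    intro hm h a b hab
    rw [Bool.and_eq_true] at h
    rcases hab with ⟨rfl, h2, h3, h4⟩ | hr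
    · rcases eq_or_lt_of_le h3 with rfl | hlt
      · exact h.1
      · exact IH hm h.2 a b (Or.inl ⟨rfl, h2, by omega, h4⟩)
    · exact IH hm h.2 a b (Or.inr hr)
  | case2 i j m hi hj IH =>
    intro hm h a b hab
    rcases hab with ⟨rfl, h2, h3, h4⟩ | ⟨h1, h2, h3, h4⟩
    · omega
    · rcases eq_or_lt_of_le (by omega : i + 1 ≤ a) with rfl | hlt
      · exact IH (by omega) h (i + 1) b (Or.inl ⟨rfl, h2, h3, by omega⟩)
      · exact IH (by omega) h a b (Or.inr ⟨hlt, h2, h3, h4⟩)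
  | case3 i j m hi =>
    intro hm h a b hab
    rcases hab with ⟨rfl, h2, h3, h4⟩ | ⟨h1, h2, h3, h4⟩ <;> omega

theorem check_elim (t : List (List String)) (hpre : Pre_is_sator_square t)
    (a b : Nat) (ha : a < t.length) (hb : b < t.length)
    (h : satorCheck t (t.length : Int) (a : Int) (b : Int) = true) :
    (a = b → gN t a a = gN t (t.length - 1 - a) (t.length - 1 - a)) ∧
    (a ≠ b → gN t a b = gN t b a ∧
      gN t b a = gN t (t.length - 1 - a) (t.length - 1 - b) ∧
      gN t (t.length - 1 - a) (t.length - 1 - b) = gN t (t.length - 1 - b) (t.length - 1 - a)) := by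
  have e1 : (t.length : Int) - (a : Int) - 1 = ((t.length - 1 - a : Nat) : Int) := by omega
  have e2 : (t.length : Int) - (b : Int) - 1 = ((t.length - 1 - b : Nat) : Int) := by omega
  constructor
  · intro hab
    subst hab
    unfold satorCheck at h
    rw [if_pos rfl, e1, cell_eq t hpre a a ha ha,
        cell_eq t hpre _ _ (by omega) (by omega)] at h
    simpa using h
  · intro hab
    unfold satorCheck at h
    rw [if_neg (by exact_mod_cast hab), e1, e2, cell_eq t hpre a b ha hb,
        cell_eq t hpre b a hb ha, cell_eq t hpre _ _ (by omega) (by omega),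
        cell_eq t hpre _ _ (by omega) (by omega)] at h
    simpa using h

theorem QQ_of_checks (t : List (List String)) (m2 : Int)
    (hpre : Pre_is_sator_square t)
    (hm2 : ∀ x : Nat, 2 * x + 1 ≤ t.length → (x : Int) ≤ m2)
    (hch : ∀ a b : Int,
      ((a = 0 ∧ a ≤ m2 ∧ (0:Int) ≤ b ∧ b < (t.length : Int)) ∨
       ((0:Int) < a ∧ a ≤ m2 ∧ a ≤ b ∧ b < (t.length : Int) - a)) →
      satorCheck t (t.length : Int) a b = true) :
    QQ t := by
  have orbit : ∀ x y : Nat, x < t.length → y < t.length → x ≤ y → x + y ≤ t.length - 1 →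
      gN t x y = gN t y x ∧
      gN t x y = gN t (t.length - 1 - x) (t.length - 1 - y) ∧
      gN t (t.length - 1 - x) (t.length - 1 - y) = gN t (t.length - 1 - y) (t.length - 1 - x) := by
    intro x y hx hy hxy hsum
    have hcheck : satorCheck t (t.length : Int) (x : Int) (y : Int) = true := by
      apply hch
      rcases Nat.eq_zero_or_pos x with rfl | hpos
      · exact Or.inl ⟨by norm_num, by simpa using hm2 0 (by omega), by omega, by omega⟩
      · exact Or.inr ⟨by exact_mod_cast hpos, hm2 x (by omega), by exact_mod_cast hxy, by omega⟩
    have he := check_elim t hpre x y hx hy hcheck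
    by_cases hxy2 : x = y
    · subst hxy2
      exact ⟨rfl, he.1 rfl, rfl⟩
    · obtain ⟨f1, f2, f3⟩ := he.2 hxy2
      exact ⟨f1, f1.trans f2, f3⟩
  intro a b ha hb
  rcases le_total a b with hab | hab
  · rcases le_total a (t.length - 1 - b) with hq1 | hq1
    · obtain ⟨o1, o2, _⟩ := orbit a b ha hb hab (by omega)
      exact ⟨o1, o2⟩
    · obtain ⟨o1, o2, o3⟩ := orbit (t.length - 1 - b) (t.length - 1 - a)
        (by omega) (by omega) (by omega) (by omega)
      have r1 : t.length - 1 - (t.length - 1 - b) = b := by omega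
      have r2 : t.length - 1 - (t.length - 1 - a) = a := by omega
      rw [r1, r2] at o2 o3
      exact ⟨o3.symm, (o3.symm.trans o2.symm).trans o1⟩
  · rcases le_total b (t.length - 1 - a) with hq1 | hq1
    · obtain ⟨o1, o2, o3⟩ := orbit b a hb ha hab (by omega)
      exact ⟨o1.symm, (o1.symm.trans o2).trans o3⟩
    · obtain ⟨o1, o2, o3⟩ := orbit (t.length - 1 - a) (t.length - 1 - b)
        (by omega) (by omega) (by omega) (by omega)
      have r1 : t.length - 1 - (t.length - 1 - a) = a := by omega
      have r2 : t.length - 1 - (t.length - 1 - b) = b := by omega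
      rw [r1, r2] at o2 o3
      exact ⟨o3, o2.symm⟩

theorem A_iff_QQ (t : List (List String)) (hpre : Pre_is_sator_square t) :
    is_sator_square t = true ↔ QQ t := by
  unfold is_sator_square
  simp only []
  constructor
  · intro h
    exact QQ_of_checks t _ hpre (m2_facts t)
      (fun a b hab => loopA_checks t _ 0 0 (t.length : Int) (by omega) h a b hab)
  · intro hq
    exact loopA_of_QQ t _ hpre hq 0 0 (t.length : Int) le_rfl le_rfl (by omega)

-- ===== VERDICT =====
theorem is_sator_square_spec : Claim_equal_is_sator_square := by
  intro t _hdom hpre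
  unfold Spec_is_sator_square
  rw [Bool.eq_iff_iff, A_iff_QQ t hpre, alt_iff_QQ t hpre]
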